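-- pv_equiv track=rewrite | github.com/petertzy/CleverGit | clevergit/core/conflict.py | has_conflict_markers
-- ===== SOURCE A (Python) =====
-- def has_conflict_markers(content: str) -> bool:
--     """
--     Check if content contains conflict markers.
--
--     Args:
--         content: File content to check
--
--     Returns:
--         True if conflict markers are present
--     """
--     lines = content.split('\n')
--     return any(
--         line.startswith('<<<<<<<') or
--         line.startswith('=======') or
--         line.startswith('>>>>>>>')
--         for line in lines
--     )
-- ===== SOURCE B (Python) =====
-- def has_conflict_markers(content: str) -> bool:
--     """
--     Check if content contains conflict markers.
--
--     Substring search instead of splitting into lines: a marker occurs at a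
--     line start iff the whole string starts with it or '\n' + marker occurs
--     somewhere in the string.
--     """
--     return (content.startswith('<<<<<<<') or '\n<<<<<<<' in content
--             or content.startswith('=======') or '\n=======' in content
--             or content.startswith('>>>>>>>') or '\n>>>>>>>' in content)
-- ===== Notes on version B (the rewrite author's own statement) =====
-- stated objective: alternative
-- what changed: Replaces splitting the content into a line list and testing each line's prefix by three substring searches anchored to line starts (startswith or '\n'+marker in content) with no intermediate list.
import Mathlib
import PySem

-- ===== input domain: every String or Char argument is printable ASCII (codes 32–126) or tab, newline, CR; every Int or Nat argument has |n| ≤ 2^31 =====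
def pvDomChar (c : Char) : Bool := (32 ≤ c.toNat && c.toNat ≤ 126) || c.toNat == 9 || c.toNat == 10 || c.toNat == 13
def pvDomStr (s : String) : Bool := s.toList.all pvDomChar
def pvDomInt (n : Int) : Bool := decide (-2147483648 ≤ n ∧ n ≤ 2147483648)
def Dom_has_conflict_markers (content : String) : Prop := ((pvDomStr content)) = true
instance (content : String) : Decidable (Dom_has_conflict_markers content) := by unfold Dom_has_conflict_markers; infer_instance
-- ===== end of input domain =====

-- B replaces A's split-into-lines-and-check-each-prefix by three substring searches
-- anchored to line starts (startswith or "\n"+marker in content), building no line list.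


-- ===== PORT A =====
-- lines = content.split('\n'); any(line.startswith(m1) or line.startswith(m2) or line.startswith(m3) for line in lines)
-- split? returns none only for an empty separator; "\n" is non-empty, so the none branch is unreachable.
def has_conflict_markers (content : String) : Bool :=
  match PySem.Str.split? content "\n" with
  | some lines =>
      lines.any (fun line =>
        PySem.Str.startswith line "<<<<<<<" ||
        PySem.Str.startswith line "=======" ||
        PySem.Str.startswith line ">>>>>>>")
  | none => false

-- ===== PORT B =====
-- content.startswith(m) or '\n'+m in content, for each of the three markers ('\n'+m written as its literal value)
def has_conflict_markers_alt (content : String) : Bool :=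
  PySem.Str.startswith content "<<<<<<<" || PySem.Str.isIn "\n<<<<<<<" content ||
  PySem.Str.startswith content "=======" || PySem.Str.isIn "\n=======" content ||
  PySem.Str.startswith content ">>>>>>>" || PySem.Str.isIn "\n>>>>>>>" content

-- ===== PRECONDITION & SPEC =====
def Spec_has_conflict_markers (content : String) (out : Bool) : Prop := out = has_conflict_markers_alt content
instance (content : String) (out : Bool) : Decidable (Spec_has_conflict_markers content out) := by unfold Spec_has_conflict_markers; infer_instance

-- ===== CLAIM (what is proved, stated in full; the proofs are below) =====
def Claim_equal_has_conflict_markers : Prop := ∀ (content : String), Dom_has_conflict_markers content → Spec_has_conflict_markers content (has_conflict_markers content)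

-- ===== LEMMAS AND PROOFS =====

-- structural model of content.split('\n') (single-character separator)
def pvLines : List Char → List (List Char)
  | [] => [[]]
  | c :: cs => if c = '\n' then [] :: pvLines cs else (pvLines cs).modifyHead (c :: ·)

theorem pvLines_newline (cs : List Char) : pvLines ('\n' :: cs) = [] :: pvLines cs := by
  simp [pvLines]

theorem pvLines_cons {c : Char} (hc : c ≠ '\n') (cs : List Char) :
    pvLines (c :: cs) = (pvLines cs).modifyHead (c :: ·) := by
  simp [pvLines, hc]

theorem pvLines_ne_nil (cs : List Char) : pvLines cs ≠ [] := by
  induction cs with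
  | nil => simp [pvLines]
  | cons c cs ih =>
      by_cases hc : c = '\n'
      · subst hc; simp [pvLines_newline]
      · rw [pvLines_cons hc]
        cases h : pvLines cs with
        | nil => exact absurd h ih
        | cons a t => simp [List.modifyHead]

theorem pvGo_eq (fuel : Nat) (l : List Char) (hl : l.length < fuel)
    (cur : List Char) (acc : List (List Char)) :
    PySem.Chars.splitOn.go ['\n'] fuel l cur acc
      = acc.reverse ++ (pvLines l).modifyHead (cur.reverse ++ ·) := by
  induction fuel generalizing l cur acc with
  | zero => omega
  | succ fuel ih =>
      cases l with
      | nil =>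
          simp [PySem.Chars.splitOn.go, pvLines]
      | cons c rest =>
          by_cases hc : c = '\n'
          · subst hc
            have hstep : PySem.Chars.splitOn.go ['\n'] (fuel + 1) ('\n' :: rest) cur acc
                = PySem.Chars.splitOn.go ['\n'] fuel rest [] (cur.reverse :: acc) := by
              simp [PySem.Chars.splitOn.go, List.isPrefixOf]
            rw [hstep, ih rest (by simpa using Nat.lt_of_succ_lt_succ hl)]
            have hid : List.modifyHead (fun x : List Char => x) (pvLines rest) = pvLines rest := by
              cases pvLines rest <;> simp
            simp [pvLines_newline, hid]
          · have hstep : PySem.Chars.splitOn.go ['\n'] (fuel + 1) (c :: rest) cur acc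
                = PySem.Chars.splitOn.go ['\n'] fuel rest (c :: cur) acc := by
              simp [PySem.Chars.splitOn.go, List.isPrefixOf]
              exact fun h => absurd h.symm hc
            rw [hstep, ih rest (by simpa using Nat.lt_of_succ_lt_succ hl)]
            rw [pvLines_cons hc]
            cases h : pvLines rest with
            | nil => exact absurd h (pvLines_ne_nil rest)
            | cons a t => simp [List.modifyHead]

theorem splitOn_newline_eq (cs : List Char) :
    PySem.Chars.splitOn cs ['\n'] = pvLines cs := by
  unfold PySem.Chars.splitOn
  rw [pvGo_eq cs.length.succ cs (Nat.lt_succ_self _)]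
  cases h : pvLines cs with
  | nil => exact absurd h (pvLines_ne_nil cs)
  | cons a t => simp

-- the head of the line list: prefix of the first line = prefix of the whole string (markers contain no '\n')
theorem head_prefix_iff (m : List Char) (hm : '\n' ∉ m) :
    ∀ cs : List Char, (m <+: (pvLines cs).headD []) ↔ m <+: cs := by
  intro cs
  induction cs generalizing m with
  | nil => simp [pvLines]
  | cons c cs ih =>
      by_cases hc : c = '\n'
      · subst hc
        rw [pvLines_newline]
        simp only [List.headD_cons]
        constructor
        · intro h
          rw [List.prefix_nil.mp h]
          exact List.nil_prefix
        · intro h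
          cases m with
          | nil => exact List.nil_prefix
          | cons a t =>
              rw [List.cons_prefix_cons] at h
              have : '\n' ∈ a :: t := by rw [h.1]; exact List.mem_cons_self
              exact absurd this hm
      · rw [pvLines_cons hc]
        cases hps : pvLines cs with
        | nil => exact absurd hps (pvLines_ne_nil cs)
        | cons a t =>
            simp only [List.modifyHead, List.headD_cons]
            cases m with
            | nil => simp
            | cons b bs =>
                rw [List.cons_prefix_cons, List.cons_prefix_cons]
                have hbs : '\n' ∉ bs := fun h => hm (List.mem_cons_of_mem _ h)
                have := ih bs hbs
                rw [hps] at this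
                simp only [List.headD_cons] at this
                exact and_congr Iff.rfl this

-- the tail of the line list: a marker at a later line start = '\n' ++ marker as an infix
theorem tail_prefix_iff (m : List Char) (hm : '\n' ∉ m) :
    ∀ cs : List Char, (∃ l ∈ (pvLines cs).tail, m <+: l) ↔ ('\n' :: m) <:+: cs := by
  intro cs
  induction cs with
  | nil => simp [pvLines]
  | cons c cs ih =>
      by_cases hc : c = '\n'
      · subst hc
        rw [pvLines_newline, List.tail_cons, List.infix_cons_iff]
        constructor
        · intro ⟨l, hl, hpre⟩
          cases hps : pvLines cs with
          | nil => exact absurd hps (pvLines_ne_nil cs)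
          | cons a t =>
              rw [hps] at hl
              rcases List.mem_cons.mp hl with rfl | hlt
              · left
                rw [List.cons_prefix_cons]
                refine ⟨rfl, ?_⟩
                rw [← head_prefix_iff m hm cs, hps]
                simpa using hpre
              · right
                exact ih.mp ⟨l, by rw [hps]; simpa using hlt, hpre⟩
        · intro h
          rcases h with h | h
          · rw [List.cons_prefix_cons] at h
            have hh : m <+: (pvLines cs).headD [] := (head_prefix_iff m hm cs).mpr h.2
            cases hps : pvLines cs with
            | nil => exact absurd hps (pvLines_ne_nil cs)
            | cons a t =>
                rw [hps] at hh; simp only [List.headD_cons] at hh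
                exact ⟨a, by simp, hh⟩
          · obtain ⟨l, hl, hpre⟩ := ih.mpr h
            cases hps : pvLines cs with
            | nil => exact absurd hps (pvLines_ne_nil cs)
            | cons a t =>
                rw [hps] at hl
                exact ⟨l, List.mem_cons_of_mem _ (by simpa using hl), hpre⟩
      · rw [pvLines_cons hc]
        have htail : ((pvLines cs).modifyHead (c :: ·)).tail = (pvLines cs).tail := by
          cases hps : pvLines cs with
          | nil => exact absurd hps (pvLines_ne_nil cs)
          | cons a t => simp [List.modifyHead]
        rw [htail, ih, List.infix_cons_iff]
        constructor
        · exact Or.inr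
        · intro h
          rcases h with h | h
          · rw [List.cons_prefix_cons] at h
            exact absurd h.1.symm hc
          · exact h

-- all lines together
theorem lines_any_iff (m : List Char) (hm : '\n' ∉ m) (cs : List Char) :
    (∃ l ∈ pvLines cs, m <+: l) ↔ (m <+: cs ∨ ('\n' :: m) <:+: cs) := by
  cases hps : pvLines cs with
  | nil => exact absurd hps (pvLines_ne_nil cs)
  | cons a t =>
      rw [← head_prefix_iff m hm cs, ← tail_prefix_iff m hm cs, hps]
      simp only [List.headD_cons, List.tail_cons, List.mem_cons]
      constructor
      · intro ⟨l, hl, hpre⟩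
        rcases hl with rfl | hl
        · exact Or.inl hpre
        · exact Or.inr ⟨l, hl, hpre⟩
      · intro h
        rcases h with h | ⟨l, hl, hpre⟩
        · exact ⟨a, Or.inl rfl, h⟩
        · exact ⟨l, Or.inr hl, hpre⟩

theorem marker_eq (m nm : String) (hnm : nm.toList = '\n' :: m.toList) (hm : '\n' ∉ m.toList)
    (content : String) :
    ((PySem.Chars.splitOn content.toList ['\n']).any
        (fun l => PySem.Chars.startswith l m.toList))
      = (PySem.Chars.startswith content.toList m.toList || PySem.Str.isIn nm content) := by
  rw [Bool.eq_iff_iff, splitOn_newline_eq]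
  simp only [List.any_eq_true, PySem.Chars.startswith_iff, Bool.or_eq_true,
    PySem.Str.isIn_iff_infix, hnm]
  exact lines_any_iff m.toList hm content.toList

theorem pvAny_or {α : Type} (l : List α) (p q : α → Bool) :
    (l.any fun x => p x || q x) = (l.any p || l.any q) := by
  induction l with
  | nil => simp
  | cons a t ih => simp [ih, Bool.or_assoc, Bool.or_left_comm]

-- ===== VERDICT (by name: the statement is the Claim_ definition above) =====
theorem has_conflict_markers_spec : Claim_equal_has_conflict_markers := by
  intro content _
  unfold Spec_has_conflict_markers has_conflict_markers has_conflict_markers_alt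
  have hsplit : PySem.Str.split? content "\n"
      = some ((PySem.Chars.splitOn content.toList ['\n']).map String.ofList) := by
    have h1 : "\n".toList = ['\n'] := rfl
    simp [PySem.Str.split?, PySem.Chars.split?, h1]
  rw [hsplit]
  simp only [List.any_map, Function.comp_def, PySem.Str.startswith_eq, String.toList_ofList]
  rw [pvAny_or, pvAny_or]
  rw [marker_eq "<<<<<<<" "\n<<<<<<<" (by decide) (by decide) content,
      marker_eq "=======" "\n=======" (by decide) (by decide) content,
      marker_eq ">>>>>>>" "\n>>>>>>>" (by decide) (by decide) content]
  simp [Bool.or_assoc]
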